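-- pv_equiv track=rewrite | github.com/danielhill676/scripts_master | alma_data_download.py | get_array_type
-- ===== SOURCE A (Python) =====
-- def get_array_type(antenna_string):
--     antennas = antenna_string.split()
--     has_12m = any('DV' in ant for ant in antennas)
--     has_7m = any('CM' in ant or 'DA' in ant for ant in antennas)
--     has_tp = any('PM' in ant for ant in antennas)
--
--     if has_12m:
--         return '12m'
--     elif has_7m:
--         return '7m ACA'
--     elif has_tp:
--         return 'TP'
--     else:
--         return 'Unknown'
-- ===== SOURCE B (Python) =====
-- def get_array_type(antenna_string):
--     # Character-pair automaton: every pattern ('DV', 'CM', 'DA', 'PM') is two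
--     # non-whitespace characters, so it occurs inside a split() token exactly
--     # when it occurs as an adjacent character pair of the raw string.
--     # Track the best (lowest) priority rank seen in one pass, no tokenization.
--     LABELS = ('12m', '7m ACA', 'TP', 'Unknown')
--     best = 3
--     prev = ''
--     for ch in antenna_string:
--         pair = prev + ch
--         if pair == 'DV':
--             best = min(best, 0)
--         elif pair in ('CM', 'DA'):
--             best = min(best, 1)
--         elif pair == 'PM':
--             best = min(best, 2)
--         prev = ch
--     return LABELS[best]
-- ===== Notes on version B (the rewrite author's own statement) =====
-- stated objective: alternative
-- what changed: Replaces split()-into-tokens plus three any()-substring scans with a single character-pair automaton over the raw string that tracks the minimum priority rank (correct because every pattern is two non-whitespace characters, so it lies inside a token iff it is an adjacent pair of the raw string).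
import Mathlib
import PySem

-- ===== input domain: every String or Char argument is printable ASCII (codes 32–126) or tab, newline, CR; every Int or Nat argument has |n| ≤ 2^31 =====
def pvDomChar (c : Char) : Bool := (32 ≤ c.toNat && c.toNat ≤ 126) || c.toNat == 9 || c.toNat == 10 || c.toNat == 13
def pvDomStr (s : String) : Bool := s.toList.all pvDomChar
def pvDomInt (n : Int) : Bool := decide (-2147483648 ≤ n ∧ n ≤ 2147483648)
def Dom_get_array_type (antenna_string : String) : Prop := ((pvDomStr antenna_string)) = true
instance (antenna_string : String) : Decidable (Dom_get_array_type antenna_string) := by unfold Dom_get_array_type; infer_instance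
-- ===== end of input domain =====

-- B replaces split()+three any()-substring scans with one character-pair automaton
-- over the raw string tracking the minimum priority rank (alternative decomposition, same cost).

-- ===== PORT A =====
def get_array_type (antenna_string : String) : String :=
  let antennas := PySem.Str.split₀ antenna_string
  let has_12m := antennas.any (fun ant => PySem.Str.isIn "DV" ant)
  let has_7m := antennas.any (fun ant => PySem.Str.isIn "CM" ant || PySem.Str.isIn "DA" ant)
  let has_tp := antennas.any (fun ant => PySem.Str.isIn "PM" ant)
  if has_12m then "12m"
  else if has_7m then "7m ACA"
  else if has_tp then "TP"
  else "Unknown"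

-- ===== PORT B =====
-- state = (best rank so far, chars of prev — '' or one char); pair = prev + ch
def get_array_type_alt (antenna_string : String) : String :=
  let r := antenna_string.toList.foldl
    (fun (st : Nat × List Char) ch =>
      let pair := st.2 ++ [ch]
      let best :=
        if pair == "DV".toList then min st.1 0
        else if pair == "CM".toList || pair == "DA".toList then min st.1 1
        else if pair == "PM".toList then min st.1 2
        else st.1
      (best, [ch]))
    (3, [])
  -- LABELS[best] as a case split on the index
  if r.1 == 0 then "12m"
  else if r.1 == 1 then "7m ACA"
  else if r.1 == 2 then "TP"
  else "Unknown"

-- ===== PRECONDITION & SPEC =====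
def Spec_get_array_type (antenna_string : String) (out : String) : Prop := out = get_array_type_alt antenna_string
instance (antenna_string : String) (out : String) : Decidable (Spec_get_array_type antenna_string out) := by unfold Spec_get_array_type; infer_instance

-- ===== CLAIM (what is proved, stated in full; the proofs are below) =====
def Claim_equal_get_array_type : Prop := ∀ (antenna_string : String), Dom_get_array_type antenna_string → Spec_get_array_type antenna_string (get_array_type antenna_string)

-- ===== LEMMAS AND PROOFS =====

-- "pattern [a,b] occurs as an adjacent pair of cs, given a one-char-or-empty left context prev"
def pvPair (a b : Char) : List Char → List Char → Bool
  | _, [] => false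
  | prev, c :: r => (prev ++ [c] == [a, b]) || pvPair a b [c] r

lemma pvPair_irrel (a b c : Char) (r : List Char) (hc : c ≠ a) :
    pvPair a b [c] r = pvPair a b [] r := by
  cases r with
  | nil => rfl
  | cons x r' => simp [pvPair, hc]

lemma isIn_pair_nil (a b : Char) : PySem.Chars.isIn [a, b] [] = false := by
  rw [PySem.Chars.isIn_eq_false_iff]
  intro h
  have := h.length_le
  simp at this

lemma isIn_pair_snoc (a b c : Char) (t : List Char) :
    PySem.Chars.isIn [a, b] (t ++ [c])
      = (PySem.Chars.isIn [a, b] t || (t.getLast? == some a && c == b)) := by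
  by_cases h : [a, b] <:+: t ++ [c]
  · rw [(PySem.Chars.isIn_iff_infix _ _).2 h]
    rcases h with ⟨pre, suf, hps⟩
    rcases List.eq_nil_or_concat suf with rfl | ⟨suf', d, rfl⟩
    · -- suffix empty: t ++ [c] = pre ++ [a, b], so c = b and t = pre ++ [a]
      have h2 : t ++ [c] = (pre ++ [a]) ++ [b] := by simpa using hps.symm
      obtain ⟨ht, hc⟩ := List.append_inj' h2 rfl
      have hc : c = b := by simpa using hc
      have : t.getLast? = some a := by simp [ht]
      simp [this, hc]
    · -- suffix nonempty: the occurrence lies inside t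
      have h2 : t ++ [c] = (pre ++ [a, b] ++ suf') ++ [d] := by
        simpa [List.append_assoc] using hps.symm
      obtain ⟨ht, _⟩ := List.append_inj' h2 rfl
      have : PySem.Chars.isIn [a, b] t = true := by
        rw [PySem.Chars.isIn_iff_infix]
        exact ⟨pre, suf', by simp [ht]⟩
      simp [this]
  · rw [(PySem.Chars.isIn_eq_false_iff _ _).2 h]
    have h1 : PySem.Chars.isIn [a, b] t = false := by
      rw [PySem.Chars.isIn_eq_false_iff]
      intro hin
      exact h (hin.trans ⟨[], [c], by simp⟩)
    have h2 : (t.getLast? == some a && c == b) = false := by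
      by_contra hne
      have hh := Bool.and_eq_true_iff.1 (Bool.of_not_eq_false hne)
      have ha : t.getLast? = some a := by simpa using hh.1
      have hb : c = b := by simpa using hh.2
      rcases List.getLast?_eq_some_iff.1 ha with ⟨t', rfl⟩
      exact h ⟨t', [], by simp [hb]⟩
    simp [h1, h2]

-- cur is the reversed current token (non-space chars); its head is the previous char
def pvPrevOf : List Char → List Char
  | [] => []
  | h :: _ => [h]

lemma go_any (a b : Char) (ha : PySem.Chars.isspace a = false)
    (hb : PySem.Chars.isspace b = false) :
    ∀ (s cur acc : _), (∀ c ∈ cur, PySem.Chars.isspace c = false) →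
    ((PySem.Chars.split₀.go s cur acc).any (fun t => PySem.Chars.isIn [a, b] t))
      = (acc.any (fun t => PySem.Chars.isIn [a, b] t)
          || PySem.Chars.isIn [a, b] cur.reverse
          || pvPair a b (pvPrevOf cur) s) := by
  intro s
  induction s with
  | nil =>
    intro cur acc _
    by_cases hc : cur.isEmpty
    · have : cur = [] := by simpa [List.isEmpty_iff] using hc
      subst this
      simp [PySem.Chars.split₀.go, pvPair, isIn_pair_nil]
    · simp only [PySem.Chars.split₀.go, hc]
      simp [pvPair, List.any_reverse, Bool.or_comm]
  | cons c rest ih =>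
    intro cur acc hcur
    by_cases hsp : PySem.Chars.isspace c = true
    · -- whitespace: close the current token
      have hca : c ≠ a := fun h => by rw [h] at hsp; simp [ha] at hsp
      have hcb : c ≠ b := fun h => by rw [h] at hsp; simp [hb] at hsp
      by_cases hc : cur.isEmpty
      · have : cur = [] := by simpa [List.isEmpty_iff] using hc
        subst this
        simp only [PySem.Chars.split₀.go, hsp, if_true, List.isEmpty_nil]
        rw [ih [] acc (by intro c h; simp at h)]
        simp [pvPair, pvPrevOf, isIn_pair_nil, pvPair_irrel a b c rest hca]
      · have hcne : cur ≠ [] := by simpa [List.isEmpty_iff] using hc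
        simp only [PySem.Chars.split₀.go, hsp, if_true, hc, if_false, Bool.false_eq_true]
        rw [ih [] (cur.reverse :: acc) (by intro c h; simp at h)]
        obtain ⟨h0, tl, rfl⟩ := List.exists_cons_of_ne_nil hcne
        have hcb' : (c == b) = false := by simp [hcb]
        simp [pvPair, pvPrevOf, hcb', isIn_pair_nil,
          pvPair_irrel a b c rest hca, Bool.or_comm]
    · -- non-space: extend the current token
      have hsp' : PySem.Chars.isspace c = false := by simpa using hsp
      simp only [PySem.Chars.split₀.go, hsp, Bool.false_eq_true, if_false]
      rw [ih (c :: cur) acc (by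
        intro x hx
        rcases List.mem_cons.1 hx with rfl | hx
        · exact hsp'
        · exact hcur x hx)]
      simp only [List.reverse_cons, isIn_pair_snoc]
      have hlast : cur.reverse.getLast? = cur.head? := by
        simp [List.getLast?_reverse]
      cases cur with
      | nil =>
        simp [pvPrevOf, pvPair, isIn_pair_nil, Bool.or_comm]
      | cons h0 tl =>
        simp only [pvPrevOf, pvPair, hlast, List.head?_cons]
        have : ((some h0 == some a) && (c == b)) = ([h0] ++ [c] == [a, b]) := by
          simp [Bool.and_comm]
        rw [this]
        simp [Bool.or_comm, Bool.or_left_comm, Bool.or_assoc]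

lemma split_any_pair (a b : Char) (ha : PySem.Chars.isspace a = false)
    (hb : PySem.Chars.isspace b = false) (s : List Char) :
    ((PySem.Chars.split₀ s).any (fun t => PySem.Chars.isIn [a, b] t)) = pvPair a b [] s := by
  have := go_any a b ha hb s [] [] (by intro c h; simp at h)
  simpa [PySem.Chars.split₀, pvPrevOf, isIn_pair_nil] using this

-- closed form of B's fold
set_option maxHeartbeats 1000000 in
lemma fold_best (cs : List Char) : ∀ (st : Nat × List Char), st.1 ≤ 3 →
    (cs.foldl
      (fun (st : Nat × List Char) ch =>
        (if st.2 ++ [ch] == "DV".toList then min st.1 0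
         else if st.2 ++ [ch] == "CM".toList || st.2 ++ [ch] == "DA".toList then min st.1 1
         else if st.2 ++ [ch] == "PM".toList then min st.1 2
         else st.1, [ch])) st).1
    = min st.1
        (if pvPair 'D' 'V' st.2 cs then 0
         else if pvPair 'C' 'M' st.2 cs || pvPair 'D' 'A' st.2 cs then 1
         else if pvPair 'P' 'M' st.2 cs then 2
         else 3) := by
  induction cs with
  | nil =>
    intro st hst
    simp [pvPair]
    omega
  | cons c r ih =>
    intro st hst
    simp only [List.foldl_cons]
    have h' : ((fun (st : Nat × List Char) ch =>
        (if st.2 ++ [ch] == "DV".toList then min st.1 0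
         else if st.2 ++ [ch] == "CM".toList || st.2 ++ [ch] == "DA".toList then min st.1 1
         else if st.2 ++ [ch] == "PM".toList then min st.1 2
         else st.1, [ch])) st c).1 ≤ 3 := by
      dsimp only
      split_ifs <;> omega
    rw [ih _ h']
    clear ih h'
    dsimp only
    simp only [pvPair]
    split_ifs <;> simp_all

lemma any_or_split {α : Type} (l : List α) (f g : α → Bool) :
    (l.any fun x => f x || g x) = (l.any f || l.any g) := by
  induction l with
  | nil => rfl
  | cons x xs ih => simp [List.any_cons, ih, Bool.or_assoc, Bool.or_left_comm]

-- ===== VERDICT (by name: the statement is the Claim_ definition above) =====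
theorem get_array_type_spec : Claim_equal_get_array_type := by
  intro s _
  unfold Spec_get_array_type get_array_type get_array_type_alt
  dsimp only
  rw [fold_best s.toList (3, []) (by norm_num)]
  -- A side: move to Chars and the pair characterization
  have hsplit : (PySem.Str.split₀ s).any (fun ant => PySem.Str.isIn "DV" ant)
      = pvPair 'D' 'V' [] s.toList := by
    rw [show (PySem.Str.split₀ s).any (fun ant => PySem.Str.isIn "DV" ant)
        = (PySem.Chars.split₀ s.toList).any (fun t => PySem.Chars.isIn ['D', 'V'] t) by
      rw [← PySem.Str.split₀_map_toList, List.any_map]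
      rfl]
    exact split_any_pair 'D' 'V' (by decide) (by decide) s.toList
  have hsplit7 : (PySem.Str.split₀ s).any
        (fun ant => PySem.Str.isIn "CM" ant || PySem.Str.isIn "DA" ant)
      = (pvPair 'C' 'M' [] s.toList || pvPair 'D' 'A' [] s.toList) := by
    rw [show (PySem.Str.split₀ s).any (fun ant => PySem.Str.isIn "CM" ant || PySem.Str.isIn "DA" ant)
        = (PySem.Chars.split₀ s.toList).any
            (fun t => PySem.Chars.isIn ['C', 'M'] t || PySem.Chars.isIn ['D', 'A'] t) by
      rw [← PySem.Str.split₀_map_toList, List.any_map]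
      rfl]
    rw [any_or_split]
    rw [split_any_pair 'C' 'M' (by decide) (by decide) s.toList,
        split_any_pair 'D' 'A' (by decide) (by decide) s.toList]
  have hsplitTP : (PySem.Str.split₀ s).any (fun ant => PySem.Str.isIn "PM" ant)
      = pvPair 'P' 'M' [] s.toList := by
    rw [show (PySem.Str.split₀ s).any (fun ant => PySem.Str.isIn "PM" ant)
        = (PySem.Chars.split₀ s.toList).any (fun t => PySem.Chars.isIn ['P', 'M'] t) by
      rw [← PySem.Str.split₀_map_toList, List.any_map]
      rfl]
    exact split_any_pair 'P' 'M' (by decide) (by decide) s.toList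
  simp only [hsplit, hsplit7, hsplitTP]
  cases pvPair 'D' 'V' [] s.toList <;>
    cases pvPair 'C' 'M' [] s.toList <;>
      cases pvPair 'D' 'A' [] s.toList <;>
        cases pvPair 'P' 'M' [] s.toList <;> simp
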